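-- pv_equiv track=rewrite | github.com/simonpenel/syntenie_prdm9 | scripts/get_syntenies_genewise.py | fun_largest_families
-- ===== SOURCE A (Python) =====
-- def fun_largest_families(families):
--     if families == "NO DATA":
--         return("NO DATA")
--     largest_family = families[0]
--     for family in families:
--         if family[2] > largest_family[2]:
--             largest_family  = family
--         if (family[2] == largest_family[2])  and (family[1] < largest_family[1]):
--             largest_family  = family
--     return(largest_family[0])
-- ===== SOURCE B (Python) =====
-- def fun_largest_families(families):
--     if families == "NO DATA":
--         return "NO DATA"
--     return sorted(families, key=lambda f: (f[2], -f[1]), reverse=True)[0][0]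
-- ===== Notes on version B (the rewrite author's own statement) =====
-- stated objective: simpler
-- what changed: Replaces the manual best-so-far scan with its two sequential update branches by a stable sort on the key (size, -start) in reverse order followed by picking the first element's name.
-- outside the precondition, e.g. on fun_largest_families([]): A raises IndexError, B raises IndexError
import Mathlib
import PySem

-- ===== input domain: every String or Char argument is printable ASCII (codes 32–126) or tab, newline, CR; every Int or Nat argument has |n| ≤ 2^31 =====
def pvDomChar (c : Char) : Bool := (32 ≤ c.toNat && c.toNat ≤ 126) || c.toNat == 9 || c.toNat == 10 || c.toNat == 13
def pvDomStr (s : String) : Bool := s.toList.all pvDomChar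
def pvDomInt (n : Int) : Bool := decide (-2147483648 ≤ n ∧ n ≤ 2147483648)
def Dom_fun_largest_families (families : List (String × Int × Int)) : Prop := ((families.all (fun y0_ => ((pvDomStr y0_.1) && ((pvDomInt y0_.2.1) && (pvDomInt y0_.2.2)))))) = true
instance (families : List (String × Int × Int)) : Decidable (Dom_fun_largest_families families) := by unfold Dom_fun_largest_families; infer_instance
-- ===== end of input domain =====

-- B replaces A's best-so-far scan by a stable reverse sort on (size, -start) and takes the
-- first element's name (objective: simpler); same return values on every non-empty list.

-- ===== PORT A =====
-- The guard 'families == "NO DATA"' can never be true for a list argument and is dropped.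
def fun_largest_families (families : List (String × Int × Int)) : String :=
  match families with
  | [] => ""   -- families[0] raises IndexError here; excluded by Pre_
  | f0 :: _ =>
    let lf := families.foldl (fun lf family =>
      let lf := if family.2.2 > lf.2.2 then family else lf
      if family.2.2 == lf.2.2 && family.2.1 < lf.2.1 then family else lf) f0
    lf.1

-- ===== PORT B =====
-- The same impossible '== "NO DATA"' guard is dropped; sorted(..., key=(f[2], -f[1]), reverse=True)[0][0].
def fun_largest_families_alt (families : List (String × Int × Int)) : String :=
  match PySem.List.sorted2 families (fun f => f.2.2) (fun f => -f.2.1) true with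
  | [] => ""   -- [0] raises IndexError here; excluded by Pre_
  | f :: _ => f.1

-- ===== PRECONDITION & SPEC =====
-- Both programs raise IndexError on the empty list; Pre_ excludes exactly it.
def Pre_fun_largest_families (families : List (String × Int × Int)) : Prop := families ≠ []
instance (families : List (String × Int × Int)) : Decidable (Pre_fun_largest_families families) := by unfold Pre_fun_largest_families; infer_instance
def pvWitness_fun_largest_families : (List (String × Int × Int)) := [("a", 1, 2), ("b", 0, 2)]

def Spec_fun_largest_families (families : List (String × Int × Int)) (out : String) : Prop := out = fun_largest_families_alt families
instance (families : List (String × Int × Int)) (out : String) : Decidable (Spec_fun_largest_families families out) := by unfold Spec_fun_largest_families; infer_instance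

-- ===== CLAIM (what is proved, stated in full; the proofs are below) =====
def Claim_equal_fun_largest_families : Prop := ∀ (families : List (String × Int × Int)), Dom_fun_largest_families families → Pre_fun_largest_families families → Spec_fun_largest_families families (fun_largest_families families)

-- ===== LEMMAS AND PROOFS =====

-- head of the insertion-sort fold = the running best-so-far under `before`
theorem pv_head?_foldl_insertBy {T : Type} (before : T → T → Bool) :
    ∀ (xs : List T) (a : T) (acc : List T),
      (xs.foldl (fun l x => PySem.List.insertBy before x l) (a :: acc)).head? =
        some (xs.foldl (fun h x => if before x h then x else h) a) := by
  intro xs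
  induction xs with
  | nil => intro a acc; simp
  | cons x xs ih =>
    intro a acc
    simp only [List.foldl_cons, PySem.List.insertBy]
    by_cases h : before x a = true
    · simp [h, ih]
    · simp [h, ih]

-- A's two sequential update branches compute exactly B's comparison `before fam lf`
theorem pv_step_eq (lf fam : String × Int × Int) :
    (let lf1 := if fam.2.2 > lf.2.2 then fam else lf
     if fam.2.2 == lf1.2.2 && fam.2.1 < lf1.2.1 then fam else lf1) =
    (if (decide (lf.2.2 < fam.2.2) || (!decide (fam.2.2 < lf.2.2) && decide (-lf.2.1 < -fam.2.1))) then fam else lf) := by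
  simp only [beq_iff_eq, gt_iff_lt, Bool.or_eq_true, Bool.and_eq_true, Bool.not_eq_eq_eq_not,
    decide_eq_true_eq]
  split_ifs <;> simp_all <;> try omega

theorem fun_largest_families_eq (families : List (String × Int × Int))
    (h : families ≠ []) :
    fun_largest_families families = fun_largest_families_alt families := by
  match families with
  | [] => exact absurd rfl h
  | f0 :: rest =>
    unfold fun_largest_families fun_largest_families_alt
    simp only [PySem.List.sorted2]
    have hB := pv_head?_foldl_insertBy
      (fun a b => decide ((fun f : String × Int × Int => f.2.2) b < (fun f : String × Int × Int => f.2.2) a) ||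
        (!decide ((fun f : String × Int × Int => f.2.2) a < (fun f : String × Int × Int => f.2.2) b) &&
          decide ((fun f : String × Int × Int => -f.2.1) b < (fun f : String × Int × Int => -f.2.1) a)))
      rest f0 []
    -- rewrite A's fold step to B's comparison
    have hstep : (fun (lf family : String × Int × Int) =>
        (let lf := if family.2.2 > lf.2.2 then family else lf
         if family.2.2 == lf.2.2 && family.2.1 < lf.2.1 then family else lf)) =
        (fun lf family => if (decide (lf.2.2 < family.2.2) ||
            (!decide (family.2.2 < lf.2.2) && decide (-lf.2.1 < -family.2.1))) then family else lf) := by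
      funext lf family; exact pv_step_eq lf family
    simp only [List.foldl_cons, hstep]
    -- A's first step: comparing f0 with itself keeps f0
    have hfirst : (if (decide (f0.2.2 < f0.2.2) ||
        (!decide (f0.2.2 < f0.2.2) && decide (-f0.2.1 < -f0.2.1))) then f0 else f0) = f0 := by
      simp
    rw [hfirst]
    -- B's first insertBy step on []: [f0]
    have hins : PySem.List.insertBy (fun a b => decide ((b.2.2 : Int) < a.2.2) ||
        (!decide ((a.2.2 : Int) < b.2.2) && decide ((-b.2.1 : Int) < -a.2.1))) f0 ([] : List (String × Int × Int)) = [f0] := by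
      simp [PySem.List.insertBy]
    simp only [if_true] at hB ⊢
    rw [hins]
    cases hfold : (rest.foldl (fun l x => PySem.List.insertBy (fun a b => decide ((b.2.2 : Int) < a.2.2) ||
        (!decide ((a.2.2 : Int) < b.2.2) && decide ((-b.2.1 : Int) < -a.2.1))) x l) [f0]) with
    | nil => rw [hfold] at hB; simp at hB
    | cons m t =>
      rw [hfold] at hB
      simp only [List.head?] at hB
      have hm : m = rest.foldl (fun h x => if (decide ((h.2.2 : Int) < x.2.2) ||
          (!decide ((x.2.2 : Int) < h.2.2) && decide ((-h.2.1 : Int) < -x.2.1))) then x else h) f0 := by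
        injection hB
      rw [hm]

-- ===== VERDICT (by name: the statement is the Claim_ definition above) =====
theorem fun_largest_families_spec : Claim_equal_fun_largest_families := by
  intro families _ hpre
  unfold Spec_fun_largest_families
  exact fun_largest_families_eq families hpre
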